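-- pv_equiv track=rewrite | github.com/BOB-BookBridge/BOB-perf | crawler/scripts/fetch_korea_bestseller_books.py | generate_months
-- ===== SOURCE A (Python) =====
-- def generate_months(start_year, start_month, count=100):
--   """월별 목록을 역순으로 생성합니다. (각 월의 1주차만)"""
--   months = []
--   year, month = start_year, start_month
--
--   for _ in range(count):
--     months.append((year, month, 1))
--
--     month -= 1
--     if month < 1:
--       year -= 1
--       month = 12
--
--   return months
-- ===== SOURCE B (Python) =====
-- def generate_months(start_year, start_month, count=100):
--     """월별 목록을 역순으로 생성합니다. (각 월의 1주차만)"""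
--     same_year = [(start_year, m, 1)
--                  for m in range(start_month, max(start_month - count, 0), -1)]
--     earlier = [(start_year - 1 - i // 12, 12 - i % 12, 1)
--                for i in range(count - len(same_year))]
--     return same_year + earlier
-- ===== Notes on version B (the rewrite author's own statement) =====
-- stated objective: simpler
-- what changed: Replaces the stateful loop (carried year/month with a wrap-around branch) by two independent comprehensions: a countdown over the starting year's months and a closed-form div/mod comprehension over earlier years.
-- intended difference: For start_month < 1 (and count >= 1) A emits the nonexistent month (start_year, start_month, 1) as its first entry before wrapping, while B starts directly at December of the previous year, the last real month before the invalid start, which is the intended reverse-chronological list. — e.g. on generate_months(2024, 0, 2): A returns [(2024, 0, 1), (2023, 12, 1)], B returns [(2023, 12, 1), (2023, 11, 1)]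
import Mathlib
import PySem

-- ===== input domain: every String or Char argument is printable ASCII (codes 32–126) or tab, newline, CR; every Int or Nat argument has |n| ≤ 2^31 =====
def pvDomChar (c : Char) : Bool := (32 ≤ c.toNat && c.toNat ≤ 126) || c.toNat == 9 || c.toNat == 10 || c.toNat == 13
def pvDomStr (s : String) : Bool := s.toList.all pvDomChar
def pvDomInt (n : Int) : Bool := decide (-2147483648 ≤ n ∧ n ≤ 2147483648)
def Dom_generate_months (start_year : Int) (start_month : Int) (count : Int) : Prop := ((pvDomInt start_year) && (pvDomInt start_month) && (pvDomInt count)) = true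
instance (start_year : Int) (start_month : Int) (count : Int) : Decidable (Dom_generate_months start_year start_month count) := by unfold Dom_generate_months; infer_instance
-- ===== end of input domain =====

-- B replaces A's stateful loop and wrap-around branch by two independent comprehensions
-- (countdown over the starting year's months + closed-form div/mod over earlier years); simpler, same cost.

-- ===== PORT A =====
-- literal transliteration of A: fold over range(count) carrying (months, year, month)
def generate_months (start_year : Int) (start_month : Int) (count : Int) : List (Int × Int × Int) :=
  let s := (PySem.List.pyRange 0 count 1).foldl
    (fun (st : List (Int × Int × Int) × Int × Int) _ =>
      let months := st.1 ++ [(st.2.1, st.2.2, 1)]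
      let month := st.2.2 - 1
      if month < 1 then (months, st.2.1 - 1, 12) else (months, st.2.1, month))
    ([], start_year, start_month)
  s.1

-- ===== PORT B =====
-- literal transliteration of B: same-year countdown comprehension + closed-form div/mod comprehension
def generate_months_alt (start_year : Int) (start_month : Int) (count : Int) : List (Int × Int × Int) :=
  let same_year := (PySem.List.pyRange start_month (max (start_month - count) 0) (-1)).map
    (fun m => (start_year, m, 1))
  let earlier := (PySem.List.pyRange 0 (count - (same_year.length : Int)) 1).map
    (fun i => (start_year - 1 - PySem.Int.floordiv i 12, 12 - PySem.Int.mod i 12, 1))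
  same_year ++ earlier

-- ===== PRECONDITION & SPEC =====
-- For start_month < 1 (and count ≥ 1) A emits the nonexistent month (start_year, start_month, 1)
-- as its first entry before wrapping, while B starts directly at December of the previous year,
-- the last real month before the invalid start, which is the intended reverse-chronological list.
def D_generate_months (start_year : Int) (start_month : Int) (count : Int) : Prop :=
  start_month < 1 ∧ 1 ≤ count
instance (start_year : Int) (start_month : Int) (count : Int) : Decidable (D_generate_months start_year start_month count) := by unfold D_generate_months; infer_instance

def Spec_generate_months (start_year : Int) (start_month : Int) (count : Int) (out : List (Int × Int × Int)) : Prop := ¬ D_generate_months start_year start_month count → out = generate_months_alt start_year start_month count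
instance (start_year : Int) (start_month : Int) (count : Int) (out : List (Int × Int × Int)) : Decidable (Spec_generate_months start_year start_month count out) := by unfold Spec_generate_months; infer_instance

def pvDiffWitness_generate_months : Int × Int × Int := (2024, 0, 2)
def pvDiffWitnessOut_generate_months : (List (Int × Int × Int)) × (List (Int × Int × Int)) :=
  ([(2024, 0, 1), (2023, 12, 1)], [(2023, 12, 1), (2023, 11, 1)])

-- ===== CLAIM (what is proved, stated in full; the proofs are below) =====
def Claim_unchanged_generate_months : Prop := ∀ (start_year : Int) (start_month : Int) (count : Int), Dom_generate_months start_year start_month count → Spec_generate_months start_year start_month count (generate_months start_year start_month count)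
def Claim_changed_generate_months : Prop := Dom_generate_months (pvDiffWitness_generate_months.1) (pvDiffWitness_generate_months.2.1) (pvDiffWitness_generate_months.2.2) ∧ D_generate_months (pvDiffWitness_generate_months.1) (pvDiffWitness_generate_months.2.1) (pvDiffWitness_generate_months.2.2) ∧ generate_months (pvDiffWitness_generate_months.1) (pvDiffWitness_generate_months.2.1) (pvDiffWitness_generate_months.2.2) = pvDiffWitnessOut_generate_months.1 ∧ generate_months_alt (pvDiffWitness_generate_months.1) (pvDiffWitness_generate_months.2.1) (pvDiffWitness_generate_months.2.2) = pvDiffWitnessOut_generate_months.2 ∧ pvDiffWitnessOut_generate_months.1 ≠ pvDiffWitnessOut_generate_months.2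
def Claim_exact_generate_months : Prop := ∀ (start_year : Int) (start_month : Int) (count : Int), Dom_generate_months start_year start_month count → D_generate_months start_year start_month count → generate_months start_year start_month count ≠ generate_months_alt start_year start_month count

-- ===== LEMMAS AND PROOFS =====

-- cons-style view of A's loop (proof helper)
def loopA : Nat → Int → Int → List (Int × Int × Int)
  | 0, _, _ => []
  | n+1, y, m => (y, m, 1) :: (if m - 1 < 1 then loopA n (y - 1) 12 else loopA n y (m - 1))

-- the earlier-years element function of B (proof helper)
def gFn (y : Int) (i : Nat) : Int × Int × Int :=
  (y - 1 - PySem.Int.floordiv (i : Int) 12, 12 - PySem.Int.mod (i : Int) 12, 1)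

-- the same-year element function of B (proof helper)
def hFn (y m : Int) (i : Nat) : Int × Int × Int := (y, m - (i : Int), 1)

-- closed-form view of B over Nat counts (proof helper; faithful to B for 1 ≤ m)
def altL (n : Nat) (y m : Int) : List (Int × Int × Int) :=
  (List.range (min n m.toNat)).map (hFn y m) ++
  (List.range (n - min n m.toNat)).map (gFn y)

theorem foldA_acc (l : List Int) (acc : List (Int × Int × Int)) (y m : Int) :
    ((l.foldl
      (fun (st : List (Int × Int × Int) × Int × Int) _ =>
        let months := st.1 ++ [(st.2.1, st.2.2, 1)]
        let month := st.2.2 - 1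
        if month < 1 then (months, st.2.1 - 1, 12) else (months, st.2.1, month))
      (acc, y, m)).1) = acc ++ loopA l.length y m := by
  induction l generalizing acc y m with
  | nil => simp [loopA]
  | cons x l ih =>
    simp only [List.foldl_cons, List.length_cons, loopA]
    by_cases h : m - 1 < 1
    · simp only [h, if_pos, ih, List.append_assoc, List.singleton_append]
    · simp only [h, if_false, ih, List.append_assoc, List.singleton_append]

theorem generate_months_eq_loopA (y m c : Int) :
    generate_months y m c = loopA c.toNat y m := by
  unfold generate_months
  have h := foldA_acc (PySem.List.pyRange 0 c 1) [] y m
  simp only [PySem.List.length_pyRange_one] at h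
  simpa using h

theorem generate_months_alt_eq_altL (y m c : Int) (hm : 1 ≤ m) :
    generate_months_alt y m c = altL c.toNat y m := by
  have h1 : (m - max (m - c) 0).toNat = min c.toNat m.toNat := by omega
  simp only [generate_months_alt, altL, PySem.List.pyRange_neg_one,
    PySem.List.pyRange_one, List.map_map, List.length_map, List.length_range, h1]
  have h2 : (c - ((min c.toNat m.toNat : Nat) : Int) - 0).toNat
      = c.toNat - min c.toNat m.toNat := by omega
  rw [h2]
  congr 1
  all_goals refine List.map_congr_left (fun i _ => ?_)
  all_goals simp [gFn, Function.comp, PySem.Int.floordiv_eq_ediv_of_pos,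
    PySem.Int.mod_eq_emod_of_pos]

theorem tail_split (n : Nat) (y : Int) :
    (List.range n).map (gFn y) =
    (List.range (min n 12)).map (hFn (y - 1) 12) ++
    (List.range (n - min n 12)).map (gFn (y - 1)) := by
  apply List.ext_getElem
  · simp only [List.length_map, List.length_append, List.length_range]; omega
  · intro i hi1 hi2
    simp only [List.length_map, List.length_range] at hi1
    rw [List.getElem_map, List.getElem_range]
    by_cases h : i < min n 12
    · rw [List.getElem_append_left (by simp only [List.length_map, List.length_range]; omega), List.getElem_map, List.getElem_range]
      have hi12 : i < 12 := by omega
      unfold gFn hFn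
      rw [PySem.Int.floordiv_eq_ediv_of_pos (by norm_num),
          PySem.Int.mod_eq_emod_of_pos (by norm_num)]
      refine Prod.ext ?_ (Prod.ext ?_ rfl)
      · show y - 1 - (i : Int) / 12 = y - 1
        omega
      · show 12 - (i : Int) % 12 = 12 - (i : Int)
        omega
    · have hm : min n 12 = 12 := by omega
      rw [List.getElem_append_right (by simp only [List.length_map, List.length_range]; omega), List.getElem_map, List.getElem_range]
      simp only [List.length_map, List.length_range]
      unfold gFn
      rw [PySem.Int.floordiv_eq_ediv_of_pos (by norm_num),
          PySem.Int.mod_eq_emod_of_pos (by norm_num),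
          PySem.Int.floordiv_eq_ediv_of_pos (by norm_num),
          PySem.Int.mod_eq_emod_of_pos (by norm_num)]
      refine Prod.ext ?_ (Prod.ext ?_ rfl)
      · show y - 1 - (i : Int) / 12 = y - 1 - 1 - ((i - min n 12 : Nat) : Int) / 12
        push_cast [hm]; omega
      · show 12 - (i : Int) % 12 = 12 - ((i - min n 12 : Nat) : Int) % 12
        push_cast [hm]; omega

theorem altL_succ_one (n : Nat) (y : Int) :
    altL (n + 1) y 1 = (y, 1, 1) :: altL n (y - 1) 12 := by
  unfold altL
  have h12 : ((12 : Int)).toNat = 12 := by decide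
  have h1 : ((1 : Int)).toNat = 1 := by decide
  rw [h1, h12]
  have h2 : min (n + 1) 1 = 1 := by omega
  have h3 : n + 1 - 1 = n := rfl
  rw [h2, h3, tail_split n y]
  simp [hFn]

theorem altL_succ_ge2 (n : Nat) (y m : Int) (h : 2 ≤ m) :
    altL (n + 1) y m = (y, m, 1) :: altL n y (m - 1) := by
  unfold altL
  have h1 : min (n + 1) m.toNat = min n (m - 1).toNat + 1 := by omega
  have h2 : n + 1 - (min n (m - 1).toNat + 1) = n - min n (m - 1).toNat := by omega
  rw [h1, h2, List.range_succ_eq_map, List.map_cons, List.map_map]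
  simp only [hFn, Nat.cast_zero, sub_zero, List.cons_append]
  congr 2
  exact List.map_congr_left (fun i _ => by
    simp only [Function.comp, hFn, Prod.mk.injEq, and_true, true_and]
    push_cast; omega)

theorem loopA_eq_altL (n : Nat) (y m : Int) (hm : 1 ≤ m) : loopA n y m = altL n y m := by
  induction n generalizing y m with
  | zero => simp [loopA, altL]
  | succ n ih =>
    rw [loopA]
    by_cases h : m - 1 < 1
    · have hm1 : m = 1 := by omega
      subst hm1
      rw [if_pos (by norm_num), ih (y - 1) 12 (by norm_num), altL_succ_one]
    · rw [if_neg h, ih y (m - 1) (by omega), altL_succ_ge2 n y m (by omega)]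

theorem alt_nil_of_nonpos (y m c : Int) (hc : c < 1) : generate_months_alt y m c = [] := by
  unfold generate_months_alt
  by_cases hm : m ≤ 0
  · rw [PySem.List.pyRange_neg_one_eq_nil (by omega)]
    simp only [List.map_nil, List.length_nil, Nat.cast_zero, sub_zero, List.nil_append]
    rw [PySem.List.pyRange_one_eq_nil (by omega)]
    simp
  · rw [PySem.List.pyRange_neg_one_eq_nil (by omega)]
    simp only [List.map_nil, List.length_nil, Nat.cast_zero, sub_zero, List.nil_append]
    rw [PySem.List.pyRange_one_eq_nil (by omega)]
    simp

theorem alt_cons_of_D (y m c : Int) (hm : m < 1) (hc : 1 ≤ c) :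
    generate_months_alt y m c = (y - 1, 12, 1) ::
      (PySem.List.pyRange 1 c 1).map
        (fun i => (y - 1 - PySem.Int.floordiv i 12, 12 - PySem.Int.mod i 12, 1)) := by
  unfold generate_months_alt
  rw [PySem.List.pyRange_neg_one_eq_nil (by omega)]
  simp only [List.map_nil, List.length_nil, Nat.cast_zero, sub_zero, List.nil_append]
  rw [PySem.List.pyRange_one_cons (by omega), List.map_cons]
  norm_num [PySem.Int.floordiv, PySem.Int.mod]

-- ===== VERDICT (by name: the statements are the Claim_ definitions above) =====
theorem generate_months_spec : Claim_unchanged_generate_months := by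
  intro y m c _ hnD
  by_cases hc : c < 1
  · rw [generate_months_eq_loopA, alt_nil_of_nonpos y m c hc]
    have : c.toNat = 0 := by omega
    rw [this]; rfl
  · by_cases hm : m < 1
    · exact absurd (show D_generate_months y m c from ⟨hm, by omega⟩) hnD
    · rw [generate_months_eq_loopA, generate_months_alt_eq_altL y m c (by omega),
        loopA_eq_altL c.toNat y m (by omega)]

theorem generate_months_changed : Claim_changed_generate_months := by
  unfold Claim_changed_generate_months; decide

theorem generate_months_tight : Claim_exact_generate_months := by
  intro y m c _ hD
  obtain ⟨hm, hc⟩ := hD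
  rw [generate_months_eq_loopA, alt_cons_of_D y m c hm hc]
  obtain ⟨k, hk⟩ : ∃ k, c.toNat = k + 1 := ⟨c.toNat - 1, by omega⟩
  rw [hk, loopA]
  intro heq
  have := List.head_eq_of_cons_eq heq
  simp only [Prod.mk.injEq] at this
  omega
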